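-- pv_equiv track=rewrite | github.com/achasseu/vCircTrappist | repet.py | compare_kmer_score
-- ===== SOURCE A (Python) =====
-- def kmerizator (seq,taille):
--     tot=taille
--     kmer_list=[]
--     while tot <= len (seq):
--         kmer=seq[tot-taille:tot]
--         tot=tot+1
--         kmer_list.append(kmer)
--     return (kmer_list)
--
-- def compare_kmer_score(seqa,seqb,taille):
--     score = 0
--     lista=kmerizator(seqa, taille)
--     listb=kmerizator(seqb, taille)
--     for kmer in lista:
--         if kmer in listb:
--             score = score + 1
--     return score
-- ===== SOURCE B (Python) =====
-- def kmerizator (seq,taille):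
--     tot=taille
--     kmer_list=[]
--     while tot <= len (seq):
--         kmer=seq[tot-taille:tot]
--         tot=tot+1
--         kmer_list.append(kmer)
--     return (kmer_list)
--
-- def compare_kmer_score(seqa,seqb,taille):
--     # aggregate seqa's kmers into a frequency table, then add the
--     # multiplicity of each DISTINCT kmer that occurs in seqb's kmer set
--     cnt = {}
--     for kmer in kmerizator(seqa, taille):
--         cnt[kmer] = cnt.get(kmer, 0) + 1
--     setb = set(kmerizator(seqb, taille))
--     score = 0
--     for kmer, c in cnt.items():
--         if kmer in setb:
--             score += c
--     return score
-- ===== Notes on version B (the rewrite author's own statement) =====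
-- stated objective: faster
-- what changed: Replaces the per-occurrence linear scan of seqb's kmer list with a frequency table of seqa's kmers plus a hash set of seqb's kmers, summing multiplicities over distinct kmers only.
import Mathlib
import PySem

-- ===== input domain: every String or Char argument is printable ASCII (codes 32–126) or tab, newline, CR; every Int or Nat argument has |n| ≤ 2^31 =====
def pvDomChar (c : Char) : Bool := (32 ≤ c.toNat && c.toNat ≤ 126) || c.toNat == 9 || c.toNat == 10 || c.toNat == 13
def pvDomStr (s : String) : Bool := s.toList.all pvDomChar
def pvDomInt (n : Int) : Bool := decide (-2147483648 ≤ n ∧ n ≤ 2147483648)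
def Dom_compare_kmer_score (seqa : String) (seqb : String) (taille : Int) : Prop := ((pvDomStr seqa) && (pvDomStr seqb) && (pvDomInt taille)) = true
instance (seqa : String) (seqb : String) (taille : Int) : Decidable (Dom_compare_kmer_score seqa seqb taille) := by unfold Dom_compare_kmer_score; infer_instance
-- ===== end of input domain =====

-- B reuses A's kmer generation unchanged; the shared helper is defined once here.
-- Header: B aggregates seqa's kmers into a frequency table and a seqb kmer set and sums
-- multiplicities over distinct kmers, instead of A's linear list scan per kmer occurrence.

-- ===== PORT A =====
-- 'while tot <= len(seq): kmer = seq[tot-taille:tot]; tot += 1; kmer_list.append(kmer)'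
def kmerLoop (seq : String) (taille : Int) (tot : Int) (acc : List String) : List String :=
  if tot ≤ PySem.Str.len seq then
    kmerLoop seq taille (tot + 1) (acc ++ [PySem.Str.slice seq (some (tot - taille)) (some tot)])
  else acc
termination_by (PySem.Str.len seq + 1 - tot).toNat
decreasing_by omega

def kmerizator (seq : String) (taille : Int) : List String :=
  kmerLoop seq taille taille []

def compare_kmer_score (seqa : String) (seqb : String) (taille : Int) : Int :=
  let lista := kmerizator seqa taille
  let listb := kmerizator seqb taille
  lista.foldl (fun score kmer => if listb.contains kmer then score + 1 else score) 0

-- ===== PORT B =====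
def compare_kmer_score_alt (seqa : String) (seqb : String) (taille : Int) : Int :=
  -- cnt[kmer] = cnt.get(kmer, 0) + 1 over seqa's kmers
  let cnt : PySem.Dict String Int :=
    (kmerizator seqa taille).foldl (fun d k => d.insert k (d.getD k 0 + 1)) PySem.Dict.empty
  let setb : PySem.Set String := PySem.Set.ofList (kmerizator seqb taille)
  cnt.items.foldl (fun score kc => if PySem.Set.contains setb kc.1 then score + kc.2 else score) 0

-- ===== PRECONDITION & SPEC =====
def Spec_compare_kmer_score (seqa : String) (seqb : String) (taille : Int) (out : Int) : Prop := out = compare_kmer_score_alt seqa seqb taille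
instance (seqa : String) (seqb : String) (taille : Int) (out : Int) : Decidable (Spec_compare_kmer_score seqa seqb taille out) := by unfold Spec_compare_kmer_score; infer_instance

-- ===== CLAIM (what is proved, stated in full; the proofs are below) =====
def Claim_equal_compare_kmer_score : Prop := ∀ (seqa : String) (seqb : String) (taille : Int), Dom_compare_kmer_score seqa seqb taille → Spec_compare_kmer_score seqa seqb taille (compare_kmer_score seqa seqb taille)

-- ===== LEMMAS AND PROOFS =====

-- counting occurrences one by one = summing multiplicities over the distinct elements
theorem countP_eq_sum_over_distinct (l : List String) (p : String → Bool) :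
    (l.countP p : Int)
      = (((PySem.Set.ofList l).filter p).map (fun k => ((l.count k : Nat) : Int))).sum := by
  have hperm : (PySem.Set.ofList l : List String).Perm l.dedup :=
    (List.perm_ext_iff_of_nodup (PySem.Set.nodup_ofList l) l.nodup_dedup).2
      (fun a => by simp [PySem.Set.mem_ofList, List.mem_dedup])
  have h := (hperm.filter p).map (fun k => ((l.count k : Nat) : Int))
  rw [h.sum_eq]
  have := List.sum_map_count_dedup_filter_eq_countP p l
  calc (l.countP p : Int)
      = (((l.dedup.filter p).map (fun x => l.count x)).sum : Nat) := by rw [this]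
    _ = ((l.dedup.filter p).map (fun k => ((l.count k : Nat) : Int))).sum := by
        rw [Nat.cast_list_sum, List.map_map]; rfl

theorem compare_eq (lista listb : List String) :
    lista.foldl (fun score kmer => if listb.contains kmer then score + 1 else score) 0
      = (PySem.Dict.counter lista).items.foldl
          (fun score kc => if PySem.Set.contains (PySem.Set.ofList listb) kc.1 then score + kc.2 else score) 0 := by
  have hp : ∀ k : String, PySem.Set.contains (PySem.Set.ofList listb) k = listb.contains k := by
    intro k
    have := PySem.Set.mem_ofList listb k
    by_cases h : k ∈ listb
    · simp_all [PySem.Set.contains]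
    · simp_all [PySem.Set.contains]
  rw [PySem.List.foldl_if_add_one (fun kmer => listb.contains kmer) lista 0]
  rw [PySem.Dict.items_counter, List.foldl_map]
  simp only [hp]
  rw [PySem.List.foldl_if_eq_foldl_filter (fun k => listb.contains k)
        (fun (score : Int) k => score + (lista.count k : Int))]
  rw [PySem.List.foldl_add]
  simpa using countP_eq_sum_over_distinct lista (fun k => listb.contains k)

-- ===== VERDICT (by name: the statement is the Claim_ definition above) =====
theorem compare_kmer_score_spec : Claim_equal_compare_kmer_score := by
  intro seqa seqb taille _
  unfold Spec_compare_kmer_score compare_kmer_score compare_kmer_score_alt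
  rw [PySem.Dict.foldl_insert_getD_add_one_eq_counter]
  exact compare_eq (kmerizator seqa taille) (kmerizator seqb taille)
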